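-- pv_equiv track=rewrite | github.com/metatronslove/NumberFansBot | Bot/MagicSquare.py | check_magic_square
-- ===== SOURCE A (Python) =====
-- def check_magic_square(magic_square, expected_sum):
-- 	n = len(magic_square)
-- 	expected_sum = int(expected_sum)  # Ensure expected_sum is integer
-- 	for i in range(n):
-- 		row_sum = sum(int(float(cell)) if str(cell).replace('.', '').isdigit() else 0 for cell in magic_square[i])
-- 		if row_sum != expected_sum:
-- 			return False
-- 	for j in range(n):
-- 		col_sum = sum(int(float(magic_square[i][j])) if str(magic_square[i][j]).replace('.', '').isdigit() else 0 for i in range(n))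
-- 		if col_sum != expected_sum:
-- 			return False
-- 	diag_sum1 = sum(int(float(magic_square[i][i])) if str(magic_square[i][i]).replace('.', '').isdigit() else 0 for i in range(n))
-- 	if diag_sum1 != expected_sum:
-- 		return False
-- 	diag_sum2 = sum(int(float(magic_square[i][n - 1 - i])) if str(magic_square[i][n - 1 - i]).replace('.', '').isdigit() else 0 for i in range(n))
-- 	if diag_sum2 != expected_sum:
-- 		return False
-- 	return True
-- ===== SOURCE B (Python) =====
-- def check_magic_square(magic_square, expected_sum):
--     """Single fused pass: accumulate every row sum, column sum and both diagonal
--     sums while walking the grid once, then compare them all against the target.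
--     A cell counts by its value when str(cell) spells a number, otherwise as 0."""
--     expected_sum = int(expected_sum)
--     n = len(magic_square)
--     col = [0] * n
--     d1 = d2 = 0
--     rows_ok = True
--     for i, row in enumerate(magic_square):
--         s = 0
--         for j, c in enumerate(row):
--             v = int(float(c)) if str(c).replace('.', '').isdigit() else 0
--             s += v
--             if j < n:
--                 col[j] += v
--                 if j == i:
--                     d1 += v
--                 if j == n - 1 - i:
--                     d2 += v
--         if s != expected_sum:
--             rows_ok = False
--     return rows_ok and all(cs == expected_sum for cs in col) and d1 == expected_sum and d2 == expected_sum
-- ===== Notes on version B (the rewrite author's own statement) =====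
-- stated objective: alternative
-- what changed: B walks the grid exactly once, accumulating every row sum, a column-sum table and both diagonal sums in a single fused pass and comparing them all at the end, instead of A's four separate scanning passes with early returns; Pre_ excludes ragged grids whose rows all sum to the target, where A either raises IndexError in its column pass or returns a value that depends on which comes first, the missing index or a column mismatch.
-- outside the precondition, e.g. on check_magic_square([[5], [2, 3]], 5): A returns False, B returns False; on check_magic_square([[5], [0, 5]], 5): A raises IndexError, B returns False
import Mathlib
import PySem

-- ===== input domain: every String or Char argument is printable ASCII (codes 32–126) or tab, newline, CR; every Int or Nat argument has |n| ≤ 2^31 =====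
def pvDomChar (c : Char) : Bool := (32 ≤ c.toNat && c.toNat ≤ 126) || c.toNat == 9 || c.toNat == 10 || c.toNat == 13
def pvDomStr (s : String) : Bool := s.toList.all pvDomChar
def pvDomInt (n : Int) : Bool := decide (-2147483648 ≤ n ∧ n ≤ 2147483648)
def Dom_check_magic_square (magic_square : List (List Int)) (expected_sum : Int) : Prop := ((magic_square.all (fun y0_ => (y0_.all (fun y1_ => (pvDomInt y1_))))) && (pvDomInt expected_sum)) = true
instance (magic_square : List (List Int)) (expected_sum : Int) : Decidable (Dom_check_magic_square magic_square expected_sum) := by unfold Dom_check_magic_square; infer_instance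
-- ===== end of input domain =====

-- B walks the grid once, accumulating all row sums, a column-sum table and both diagonal sums in a
-- single fused pass and comparing at the end, instead of A's four separate scanning passes.

-- ===== PORT A =====
-- A's per-cell parse: `int(float(cell)) if str(cell).replace('.', '').isdigit() else 0`.
-- `int(float(cell)) = cell` exactly here: cells are ints with |cell| ≤ 2^31 < 2^53, so float is exact.
def pvCellA (cell : Int) : Int :=
  if PySem.Str.strIsdigit (PySem.Str.replace (PySem.Int.toStr cell) "." "") then cell else 0

-- each `for … in range(n): if sum ≠ expected: return False` loop becomes an `.all` over the same range
def check_magic_square (magic_square : List (List Int)) (expected_sum : Int) : Bool :=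
  let n : Int := magic_square.length
  if (PySem.List.pyRange 0 n 1).all
      (fun i => ((PySem.List.pyGetD magic_square i []).map pvCellA).sum == expected_sum) then
    if (PySem.List.pyRange 0 n 1).all
        (fun j => ((PySem.List.pyRange 0 n 1).map
            (fun i => pvCellA (PySem.List.pyGetD (PySem.List.pyGetD magic_square i []) j 0))).sum == expected_sum) then
      if ((PySem.List.pyRange 0 n 1).map
            (fun i => pvCellA (PySem.List.pyGetD (PySem.List.pyGetD magic_square i []) i 0))).sum == expected_sum then
        if ((PySem.List.pyRange 0 n 1).map
              (fun i => pvCellA (PySem.List.pyGetD (PySem.List.pyGetD magic_square i []) (n - 1 - i) 0))).sum == expected_sum then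
          true
        else false
      else false
    else false
  else false

-- ===== PORT B =====
-- body of B's inner `for j, c in enumerate(row)` loop: state (s, col, d1, d2)
-- (B's python uses the same parse expression as A, so the same helper pvCellA is the faithful port)
def pvStepCell (n : Int) (i : Int) (t : Int × List Int × Int × Int) (q : Int × Int) : Int × List Int × Int × Int :=
  let v := pvCellA q.2
  let s := t.1 + v
  if q.1 < n then
    ( s,
      PySem.List.pySetD t.2.1 q.1 (PySem.List.pyGetD t.2.1 q.1 0 + v),
      (if q.1 = i then t.2.2.1 + v else t.2.2.1),
      (if q.1 = n - 1 - i then t.2.2.2 + v else t.2.2.2) )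
  else (s, t.2.1, t.2.2.1, t.2.2.2)

-- body of B's outer `for i, row in enumerate(magic_square)` loop: state (col, d1, d2, rows_ok)
def pvStepRow (n es : Int) (st : List Int × Int × Int × Bool) (p : Int × List Int) : List Int × Int × Int × Bool :=
  let r := (PySem.List.enumerate p.2 0).foldl (pvStepCell n p.1) (0, st.1, st.2.1, st.2.2.1)
  (r.2.1, r.2.2.1, r.2.2.2, st.2.2.2 && (r.1 == es))

def check_magic_square_alt (magic_square : List (List Int)) (expected_sum : Int) : Bool :=
  let n : Int := magic_square.length
  let st := (PySem.List.enumerate magic_square 0).foldl (pvStepRow n expected_sum)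
      (List.replicate magic_square.length 0, 0, 0, true)
  st.2.2.2 && st.1.all (fun c => c == expected_sum) && (st.2.1 == expected_sum) && (st.2.2.1 == expected_sum)

-- ===== PRECONDITION & SPEC =====
-- Pre_ excludes ragged inputs (some row shorter than n) whose rows all sum to expected_sum: there A
-- either raises IndexError in the column phase or returns a value decided by whichever comes first,
-- the missing index or a column mismatch.  It admits every input whose rows are all long enough, and
-- every input with a mismatching row (where A returns False in the row phase, before any indexing).
def Pre_check_magic_square (magic_square : List (List Int)) (expected_sum : Int) : Prop :=
  (∀ row ∈ magic_square, magic_square.length ≤ row.length) ∨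
  (∃ row ∈ magic_square, (row.map (fun c => if 0 ≤ c then c else 0)).sum ≠ expected_sum)
instance (magic_square : List (List Int)) (expected_sum : Int) : Decidable (Pre_check_magic_square magic_square expected_sum) := by unfold Pre_check_magic_square; infer_instance

def pvWitness_check_magic_square : List (List Int) × Int := ([[2, 2], [2, 2]], 4)

def Spec_check_magic_square (magic_square : List (List Int)) (expected_sum : Int) (out : Bool) : Prop := out = check_magic_square_alt magic_square expected_sum
instance (magic_square : List (List Int)) (expected_sum : Int) (out : Bool) : Decidable (Spec_check_magic_square magic_square expected_sum out) := by unfold Spec_check_magic_square; infer_instance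

-- ===== CLAIM (what is proved, stated in full; the proofs are below) =====
def Claim_equal_check_magic_square : Prop := ∀ (magic_square : List (List Int)) (expected_sum : Int), Dom_check_magic_square magic_square expected_sum → Pre_check_magic_square magic_square expected_sum → Spec_check_magic_square magic_square expected_sum (check_magic_square magic_square expected_sum)

-- ===== LEMMAS AND PROOFS =====

theorem pv_isdigit_digitChar (k : Nat) (h : k < 10) : PySem.Chars.isdigit (Nat.digitChar k) = true := by
  interval_cases k <;> decide

theorem pv_isdigit_toDigitsCore (fuel : Nat) : ∀ (n : Nat) (ds : List Char),
    (∀ c ∈ ds, PySem.Chars.isdigit c = true) →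
    ∀ c ∈ Nat.toDigitsCore 10 fuel n ds, PySem.Chars.isdigit c = true := by
  induction fuel with
  | zero => intro n ds h c hc; simpa [Nat.toDigitsCore] using h c (by simpa [Nat.toDigitsCore] using hc)
  | succ fuel ih =>
    intro n ds h c hc
    rw [Nat.toDigitsCore] at hc
    by_cases h10 : n / 10 = 0
    · simp only [h10] at hc
      rcases List.mem_cons.mp hc with rfl | hc
      · exact pv_isdigit_digitChar _ (Nat.mod_lt _ (by norm_num))
      · exact h c hc
    · simp only [if_neg h10] at hc
      exact ih _ _ (by
        intro c' hc'
        rcases List.mem_cons.mp hc' with rfl | hc'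
        · exact pv_isdigit_digitChar _ (Nat.mod_lt _ (by norm_num))
        · exact h c' hc') c hc

theorem pv_toDigitsCore_ne_nil (fuel : Nat) : ∀ (n : Nat) (ds : List Char),
    (ds ≠ [] ∨ 0 < fuel) → Nat.toDigitsCore 10 fuel n ds ≠ [] := by
  induction fuel with
  | zero =>
    intro n ds h
    rcases h with h | h
    · simpa [Nat.toDigitsCore] using h
    · omega
  | succ fuel ih =>
    intro n ds _
    rw [Nat.toDigitsCore]
    by_cases h10 : n / 10 = 0
    · simp [h10]
    · simp only [if_neg h10]
      exact ih _ _ (Or.inl (by simp))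

theorem pv_replace_go_no_dot (fuel : Nat) : ∀ (l acc : List Char),
    ('.' ∉ l) → l.length ≤ fuel →
    PySem.Chars.replace.go ['.'] [] fuel l acc = acc.reverse ++ l := by
  induction fuel with
  | zero =>
    intro l acc _ hlen
    have : l = [] := List.length_eq_zero_iff.mp (Nat.le_zero.mp hlen)
    subst this
    simp [PySem.Chars.replace.go]
  | succ fuel ih =>
    intro l acc hdot hlen
    cases l with
    | nil => simp [PySem.Chars.replace.go]
    | cons c t =>
      have hc : c ≠ '.' := fun h => hdot (h ▸ List.mem_cons_self)
      have hpre : List.isPrefixOf ['.'] (c :: t) = false := by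
        simp [List.isPrefixOf]
        exact fun h => (hc h.symm).elim
      rw [PySem.Chars.replace.go, hpre]
      simp only [Bool.false_eq_true, if_false]
      rw [ih t (c :: acc) (fun h => hdot (List.mem_cons_of_mem _ h)) (by simpa using Nat.le_of_succ_le_succ hlen)]
      simp

theorem pv_replace_no_dot (l : List Char) (h : '.' ∉ l) : PySem.Chars.replace l ['.'] [] = l := by
  rw [PySem.Chars.replace]
  simp only [List.isEmpty_cons, Bool.false_eq_true, if_false]
  simpa using pv_replace_go_no_dot l.length l [] h le_rfl

theorem pvCellA_eq (c : Int) : pvCellA c = (if 0 ≤ c then c else 0) := by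
  have hdig' : ∀ c' ∈ Nat.toDigits 10 c.toNat, PySem.Chars.isdigit c' = true :=
    pv_isdigit_toDigitsCore _ _ _ (by intro x hx; cases hx)
  have hnodot : ∀ (m : Nat), '.' ∉ Nat.toDigits 10 m := by
    intro m hmem
    have := pv_isdigit_toDigitsCore _ _ _ (by intro x hx; cases hx) _ hmem
    simp [PySem.Chars.isdigit] at this
  have hne : Nat.toDigits 10 c.toNat ≠ [] := pv_toDigitsCore_ne_nil _ _ _ (Or.inr (Nat.succ_pos _))
  unfold pvCellA
  have htl : (PySem.Str.replace (PySem.Int.toStr c) "." "").toList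
      = PySem.Chars.replace (PySem.Int.toChars c) ['.'] [] := by
    simp [PySem.Str.replace, PySem.Int.toStr]
  have hsd : PySem.Str.strIsdigit (PySem.Str.replace (PySem.Int.toStr c) "." "")
      = PySem.Chars.strIsdigit (PySem.Chars.replace (PySem.Int.toChars c) ['.'] []) := by
    rw [PySem.Str.strIsdigit, htl]
  rw [hsd]
  by_cases hc : c < 0
  · have htc : PySem.Int.toChars c = '-' :: Nat.toDigits 10 c.natAbs := by
      simp [PySem.Int.toChars, hc]
    rw [htc, pv_replace_no_dot _ (by
      intro h
      rcases List.mem_cons.mp h with h | h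
      · exact absurd h (by decide)
      · exact hnodot _ h)]
    have : PySem.Chars.strIsdigit ('-' :: Nat.toDigits 10 c.natAbs) = false := by
      simp [PySem.Chars.strIsdigit]
      intro h
      exact absurd h (by decide)
    rw [this]
    simp [not_le.mpr hc]
  · have htc : PySem.Int.toChars c = Nat.toDigits 10 c.toNat := by
      simp [PySem.Int.toChars, hc]
    rw [htc, pv_replace_no_dot _ (hnodot _)]
    have : PySem.Chars.strIsdigit (Nat.toDigits 10 c.toNat) = true := by
      simp [PySem.Chars.strIsdigit, hne, List.all_eq_true]
      exact hdig'
    rw [this]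
    simp [not_lt.mp hc]

theorem pv_pyGetD_cons_pos (c : Int) (cs : List Int) (t : Int) (ht : 0 < t) :
    PySem.List.pyGetD (c :: cs) t 0 = PySem.List.pyGetD cs (t - 1) 0 := by
  obtain ⟨k, rfl⟩ : ∃ k : Nat, t = ((k : Int) + 1) := ⟨(t - 1).toNat, by omega⟩
  rw [show ((k : Int) + 1) = (((k + 1 : Nat)) : Int) by push_cast; ring,
    PySem.List.pyGetD_natCast,
    show (((k + 1 : Nat) : Int) - 1) = ((k : Nat) : Int) by push_cast; ring,
    PySem.List.pyGetD_natCast, List.getD_cons_succ]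

theorem pv_inner_fst (n i : Int) (row : List Int) : ∀ (j0 s : Int) (col : List Int) (d1 d2 : Int),
    (((PySem.List.enumerate row j0).foldl (pvStepCell n i) (s, col, d1, d2)).1)
      = s + (row.map pvCellA).sum := by
  induction row with
  | nil => intro j0 s col d1 d2; simp [PySem.List.enumerate_nil]
  | cons c cs ih =>
    intro j0 s col d1 d2
    rw [PySem.List.enumerate_cons, List.foldl_cons]
    by_cases h : j0 < n <;>
      simp only [pvStepCell, if_pos, if_neg, h, if_true, if_false] <;>
      rw [ih] <;> simp <;> ring

theorem pv_inner_len (n i : Int) (row : List Int) : ∀ (j0 : Int) (hj0 : 0 ≤ j0) (s : Int) (col : List Int) (d1 d2 : Int),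
    (((PySem.List.enumerate row j0).foldl (pvStepCell n i) (s, col, d1, d2)).2.1).length
      = col.length := by
  induction row with
  | nil => intro j0 _ s col d1 d2; simp [PySem.List.enumerate_nil]
  | cons c cs ih =>
    intro j0 hj0 s col d1 d2
    rw [PySem.List.enumerate_cons, List.foldl_cons]
    by_cases h : j0 < n <;>
      simp only [pvStepCell, h, if_true, if_false, if_pos, if_neg] <;>
      rw [ih _ (by omega)] <;>
      simp [PySem.List.pySetD_of_nonneg _ _ hj0]

theorem pv_inner_d1 (n i : Int) (row : List Int) : ∀ (j0 s : Int) (col : List Int) (d1 d2 : Int),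
    (((PySem.List.enumerate row j0).foldl (pvStepCell n i) (s, col, d1, d2)).2.2.1)
      = d1 + (if j0 ≤ i ∧ i - j0 < (row.length : Int) ∧ i < n
              then pvCellA (PySem.List.pyGetD row (i - j0) 0) else 0) := by
  induction row with
  | nil => intro j0 s col d1 d2; simp [PySem.List.enumerate_nil]; omega
  | cons c cs ih =>
    intro j0 s col d1 d2
    rw [PySem.List.enumerate_cons, List.foldl_cons]
    by_cases h : j0 < n
    · simp only [pvStepCell, h, if_true]
      by_cases hji : j0 = i
      · subst hji
        rw [ih, if_pos rfl]
        have h1 : ¬ (j0 + 1 ≤ j0 ∧ j0 - (j0 + 1) < (cs.length : Int) ∧ j0 < n) := by omega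
        have h2 : (j0 ≤ j0 ∧ j0 - j0 < ((c :: cs).length : Int) ∧ j0 < n) := by
          refine ⟨le_refl _, ?_, h⟩; simp only [List.length_cons]; push_cast; omega
        rw [if_neg h1, if_pos h2]
        have : PySem.List.pyGetD (c :: cs) (j0 - j0) 0 = c := by
          rw [show j0 - j0 = 0 by ring, PySem.List.pyGetD_zero_cons]
        rw [this]; omega
      · rw [ih, if_neg hji]
        by_cases hcond : j0 + 1 ≤ i ∧ i - (j0 + 1) < (cs.length : Int) ∧ i < n
        · have hcond' : j0 ≤ i ∧ i - j0 < ((c :: cs).length : Int) ∧ i < n := by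
            constructor; · omega
            constructor; · simp only [List.length_cons]; push_cast; omega
            · exact hcond.2.2
          rw [if_pos hcond, if_pos hcond']
          rw [show i - j0 = (i - (j0+1)) + 1 by ring]
          rw [pv_pyGetD_cons_pos c cs _ (by omega)]
          congr 2; ring
        · have hcond' : ¬ (j0 ≤ i ∧ i - j0 < ((c :: cs).length : Int) ∧ i < n) := by
            simp only [List.length_cons] at *
            push_cast at *
            omega
          rw [if_neg hcond, if_neg hcond']
    · simp only [pvStepCell, h, if_false]
      rw [ih]
      have h1 : ¬ (j0 + 1 ≤ i ∧ i - (j0 + 1) < (cs.length : Int) ∧ i < n) := by omega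
      have h2 : ¬ (j0 ≤ i ∧ i - j0 < ((c :: cs).length : Int) ∧ i < n) := by
        simp only [List.length_cons]; push_cast; omega
      rw [if_neg h1, if_neg h2]

theorem pv_inner_d2 (n i : Int) (hi : 0 ≤ i) (row : List Int) : ∀ (j0 s : Int) (col : List Int) (d1 d2 : Int),
    (((PySem.List.enumerate row j0).foldl (pvStepCell n i) (s, col, d1, d2)).2.2.2)
      = d2 + (if j0 ≤ n - 1 - i ∧ n - 1 - i - j0 < (row.length : Int)
              then pvCellA (PySem.List.pyGetD row (n - 1 - i - j0) 0) else 0) := by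
  induction row with
  | nil => intro j0 s col d1 d2; simp [PySem.List.enumerate_nil]
  | cons c cs ih =>
    intro j0 s col d1 d2
    rw [PySem.List.enumerate_cons, List.foldl_cons]
    by_cases h : j0 < n
    · simp only [pvStepCell, h, if_true]
      by_cases hji : j0 = n - 1 - i
      · rw [ih, if_pos (by rw [hji])]
        have h1 : ¬ (j0 + 1 ≤ n - 1 - i ∧ n - 1 - i - (j0 + 1) < (cs.length : Int)) := by omega
        have h2 : (j0 ≤ n - 1 - i ∧ n - 1 - i - j0 < ((c :: cs).length : Int)) := by
          constructor; · omega
          · simp only [List.length_cons]; push_cast; omega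
        rw [if_neg h1, if_pos h2]
        have : PySem.List.pyGetD (c :: cs) (n - 1 - i - j0) 0 = c := by
          rw [show n - 1 - i - j0 = 0 by omega, PySem.List.pyGetD_zero_cons]
        rw [this]; omega
      · rw [ih, if_neg hji]
        by_cases hcond : j0 + 1 ≤ n - 1 - i ∧ n - 1 - i - (j0 + 1) < (cs.length : Int)
        · have hcond' : j0 ≤ n - 1 - i ∧ n - 1 - i - j0 < ((c :: cs).length : Int) := by
            constructor; · omega
            · simp only [List.length_cons]; push_cast; omega
          rw [if_pos hcond, if_pos hcond']
          rw [show n - 1 - i - j0 = (n - 1 - i - (j0+1)) + 1 by ring]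
          rw [pv_pyGetD_cons_pos c cs _ (by omega)]
          congr 2; ring
        · have hcond' : ¬ (j0 ≤ n - 1 - i ∧ n - 1 - i - j0 < ((c :: cs).length : Int)) := by
            simp only [List.length_cons]; push_cast; omega
          rw [if_neg hcond, if_neg hcond']
    · simp only [pvStepCell, h, if_false]
      rw [ih]
      have h1 : ¬ (j0 + 1 ≤ n - 1 - i ∧ n - 1 - i - (j0 + 1) < (cs.length : Int)) := by omega
      have h2 : ¬ (j0 ≤ n - 1 - i ∧ n - 1 - i - j0 < ((c :: cs).length : Int)) := by
        simp only [List.length_cons]; push_cast; omega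
      rw [if_neg h1, if_neg h2]

theorem pv_getD_set (xs : List Int) (k m : Nat) (v : Int) (hk : k < xs.length) :
    (xs.set k v).getD m 0 = if k = m then v else xs.getD m 0 := by
  simp only [List.getD_eq_getElem?_getD, List.getElem?_set]
  split_ifs with h1 h2 <;> simp_all

theorem pv_inner_col (n i : Int) (row : List Int) : ∀ (j0 : Int) (hj0 : 0 ≤ j0) (s : Int) (col : List Int)
    (hcol : (col.length : Int) = n) (d1 d2 : Int) (m : Nat) (hm : m < col.length),
    (((PySem.List.enumerate row j0).foldl (pvStepCell n i) (s, col, d1, d2)).2.1).getD m 0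
      = col.getD m 0 + (if j0 ≤ (m : Int) ∧ (m : Int) - j0 < (row.length : Int)
          then pvCellA (PySem.List.pyGetD row ((m : Int) - j0) 0) else 0) := by
  induction row with
  | nil => intro j0 hj0 s col hcol d1 d2 m hm; simp [PySem.List.enumerate_nil]
  | cons c cs ih =>
    intro j0 hj0 s col hcol d1 d2 m hm
    rw [PySem.List.enumerate_cons, List.foldl_cons]
    by_cases h : j0 < n
    · simp only [pvStepCell, h, if_true]
      rw [PySem.List.pySetD_of_nonneg _ _ hj0]
      have hjlen : j0.toNat < col.length := by omega
      rw [ih _ (by omega) _ _ (by simpa using hcol) _ _ m (by simpa using hm)]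
      rw [pv_getD_set _ _ _ _ hjlen]
      by_cases hjm : j0.toNat = m
      · rw [if_pos hjm]
        have hj0m : j0 = (m : Int) := by omega
        have h1 : ¬ (j0 + 1 ≤ (m : Int) ∧ (m : Int) - (j0 + 1) < (cs.length : Int)) := by omega
        have h2 : (j0 ≤ (m : Int) ∧ (m : Int) - j0 < ((c :: cs).length : Int)) := by
          simp only [List.length_cons]; push_cast; omega
        rw [if_neg h1, if_pos h2]
        rw [show (m : Int) - j0 = 0 by omega, PySem.List.pyGetD_zero_cons]
        have : PySem.List.pyGetD col j0 0 = col.getD m 0 := by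
          rw [PySem.List.pyGetD_eq_getElem _ _ hj0 (by omega),
            List.getD_eq_getElem _ _ (by omega)]
          simp [hjm]
        rw [this]; omega
      · rw [if_neg hjm]
        by_cases hcond : j0 + 1 ≤ (m : Int) ∧ (m : Int) - (j0 + 1) < (cs.length : Int)
        · have h2 : (j0 ≤ (m : Int) ∧ (m : Int) - j0 < ((c :: cs).length : Int)) := by
            simp only [List.length_cons]; push_cast; omega
          rw [if_pos hcond, if_pos h2]
          rw [show (m : Int) - j0 = ((m : Int) - (j0 + 1)) + 1 by ring,
            pv_pyGetD_cons_pos c cs _ (by omega)]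
          congr 3; ring
        · have h2 : ¬ (j0 ≤ (m : Int) ∧ (m : Int) - j0 < ((c :: cs).length : Int)) := by
            simp only [List.length_cons]; push_cast; omega
          rw [if_neg hcond, if_neg h2]
    · simp only [pvStepCell, h, if_false]
      rw [ih _ (by omega) _ _ hcol _ _ m hm]
      have hj0n : ¬ (j0 ≤ (m : Int)) := by
        intro hle
        have : (m : Int) < n := by omega
        omega
      have h1 : ¬ (j0 + 1 ≤ (m : Int) ∧ (m : Int) - (j0 + 1) < (cs.length : Int)) := by omega
      have h2 : ¬ (j0 ≤ (m : Int) ∧ (m : Int) - j0 < ((c :: cs).length : Int)) := by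
        push_cast; omega
      rw [if_neg h1, if_neg h2]

def pvColSum (m : Nat) (rows : List (List Int)) : Int :=
  (rows.map (fun row => if (m : Int) < (row.length : Int) then pvCellA (PySem.List.pyGetD row (m : Int) 0) else 0)).sum

def pvDiagSum1 (n : Int) (ps : List (Int × List Int)) : Int :=
  (ps.map (fun p => if 0 ≤ p.1 ∧ p.1 < (p.2.length : Int) ∧ p.1 < n
    then pvCellA (PySem.List.pyGetD p.2 p.1 0) else 0)).sum

def pvDiagSum2 (n : Int) (ps : List (Int × List Int)) : Int :=
  (ps.map (fun p => if 0 ≤ n - 1 - p.1 ∧ n - 1 - p.1 < (p.2.length : Int)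
    then pvCellA (PySem.List.pyGetD p.2 (n - 1 - p.1) 0) else 0)).sum

def pvColsAfter (col : List Int) (rows : List (List Int)) : List Int :=
  (List.range col.length).map (fun m => col.getD m 0 + pvColSum m rows)

theorem pv_colsAfter_nil (col : List Int) : pvColsAfter col [] = col := by
  apply List.ext_getElem
  · simp [pvColsAfter]
  · intro k h1 h2
    simp [pvColsAfter, pvColSum, List.getD_eq_getElem _ _ h2, List.getElem?_eq_getElem h2]


theorem pv_outer (n es : Int) (rows : List (List Int)) : ∀ (i0 : Int) (hi0 : 0 ≤ i0) (col : List Int)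
    (hcol : (col.length : Int) = n) (d1 d2 : Int) (ok : Bool),
    (PySem.List.enumerate rows i0).foldl (pvStepRow n es) (col, d1, d2, ok)
      = (pvColsAfter col rows,
         d1 + pvDiagSum1 n (PySem.List.enumerate rows i0),
         d2 + pvDiagSum2 n (PySem.List.enumerate rows i0),
         ok && rows.all (fun row => (row.map pvCellA).sum == es)) := by
  induction rows with
  | nil =>
    intro i0 hi0 col hcol d1 d2 ok
    simp [PySem.List.enumerate_nil, pv_colsAfter_nil, pvDiagSum1, pvDiagSum2]
  | cons row rest ih =>
    intro i0 hi0 col hcol d1 d2 ok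
    rw [PySem.List.enumerate_cons, List.foldl_cons]
    set r := (PySem.List.enumerate row 0).foldl (pvStepCell n i0) (0, col, d1, d2) with hr
    have hlen0 : (r.2.1).length = col.length :=
      pv_inner_len n i0 row 0 (by omega) 0 col d1 d2
    have hstep : pvStepRow n es (col, d1, d2, ok) (i0, row)
        = (r.2.1, r.2.2.1, r.2.2.2, ok && (r.1 == es)) := rfl
    rw [hstep, ih (i0 + 1) (by omega) _ (by rw [hlen0]; exact hcol)]
    have hcols : pvColsAfter r.2.1 rest = pvColsAfter col (row :: rest) := by
      unfold pvColsAfter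
      rw [hlen0]
      apply List.map_congr_left
      intro m hm
      rw [List.mem_range] at hm
      rw [hr, pv_inner_col n i0 row 0 (by omega) 0 col hcol d1 d2 m hm]
      have hsum : pvColSum m (row :: rest)
          = (if (m : Int) < (row.length : Int) then pvCellA (PySem.List.pyGetD row (m : Int) 0) else 0)
            + pvColSum m rest := by
        simp [pvColSum]
      rw [hsum, show (m : Int) - 0 = (m : Int) by ring]
      by_cases hc : (m : Int) < (row.length : Int)
      · rw [if_pos hc, if_pos ⟨by omega, hc⟩]; ring
      · rw [if_neg hc, if_neg (by omega)]; ring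
    have hd1 : r.2.2.1 + pvDiagSum1 n (PySem.List.enumerate rest (i0 + 1))
        = d1 + pvDiagSum1 n ((i0, row) :: PySem.List.enumerate rest (i0 + 1)) := by
      rw [hr, pv_inner_d1 n i0 row 0 0 col d1 d2]
      have hcons : pvDiagSum1 n ((i0, row) :: PySem.List.enumerate rest (i0 + 1))
          = (if 0 ≤ i0 ∧ i0 < (row.length : Int) ∧ i0 < n
              then pvCellA (PySem.List.pyGetD row i0 0) else 0)
            + pvDiagSum1 n (PySem.List.enumerate rest (i0 + 1)) := by
        simp [pvDiagSum1]
      rw [hcons, show i0 - 0 = i0 by ring]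
      by_cases hc : 0 ≤ i0 ∧ i0 < (row.length : Int) ∧ i0 < n
      · rw [if_pos hc]; ring
      · rw [if_neg hc]; ring
    have hd2 : r.2.2.2 + pvDiagSum2 n (PySem.List.enumerate rest (i0 + 1))
        = d2 + pvDiagSum2 n ((i0, row) :: PySem.List.enumerate rest (i0 + 1)) := by
      rw [hr, pv_inner_d2 n i0 hi0 row 0 0 col d1 d2]
      have hcons : pvDiagSum2 n ((i0, row) :: PySem.List.enumerate rest (i0 + 1))
          = (if 0 ≤ n - 1 - i0 ∧ n - 1 - i0 < (row.length : Int)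
              then pvCellA (PySem.List.pyGetD row (n - 1 - i0) 0) else 0)
            + pvDiagSum2 n (PySem.List.enumerate rest (i0 + 1)) := by
        simp [pvDiagSum2]
      rw [hcons, show n - 1 - i0 - 0 = n - 1 - i0 by ring]
      by_cases hc : 0 ≤ n - 1 - i0 ∧ n - 1 - i0 < (row.length : Int)
      · rw [if_pos hc]; ring
      · rw [if_neg hc]; ring
    have hok : ((ok && (r.1 == es)) && rest.all (fun row => (row.map pvCellA).sum == es))
        = (ok && (row :: rest).all (fun row => (row.map pvCellA).sum == es)) := by
      rw [hr, pv_inner_fst n i0 row 0 0 col d1 d2,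
        show (0 : Int) + (row.map pvCellA).sum = (row.map pvCellA).sum by ring,
        List.all_cons, Bool.and_assoc]
    rw [hcols, hd1, hd2, hok]



theorem pv_all_pyRange (ms : List (List Int)) (P : List Int → Bool) :
    (PySem.List.pyRange 0 (ms.length : Int) 1).all (fun i => P (PySem.List.pyGetD ms i [])) = ms.all P := by
  conv_rhs => rw [← PySem.List.map_pyGetD_pyRange_zero' ms ([] : List Int)]
  rw [List.all_map]
  rfl

theorem pv_sum_pyRange (ms : List (List Int)) (g : List Int → Int) :
    ((PySem.List.pyRange 0 (ms.length : Int) 1).map (fun i => g (PySem.List.pyGetD ms i []))).sum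
      = (ms.map g).sum := by
  conv_rhs => rw [← PySem.List.map_pyGetD_pyRange_zero' ms ([] : List Int)]
  rw [List.map_map]
  rfl

theorem pv_sum_pyRange_enum (ms : List (List Int)) (F : Int → List Int → Int) :
    ((PySem.List.pyRange 0 (ms.length : Int) 1).map (fun i => F i (PySem.List.pyGetD ms i []))).sum
      = ((PySem.List.enumerate ms 0).map (fun p => F p.1 p.2)).sum := by
  rw [PySem.List.enumerate_eq_map_pyRange ms ([] : List Int), List.map_map]
  rfl


-- ===== VERDICT (by name: the statement is the Claim_ definition above) =====
theorem pv_getD_replicate (k m : Nat) : (List.replicate k (0:Int)).getD m 0 = 0 := by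
  simp [List.getD_eq_getElem?_getD, List.getElem?_replicate]; split <;> simp

set_option maxHeartbeats 2000000 in
theorem check_magic_square_spec : Claim_equal_check_magic_square := by
  intro ms es _ hpre
  unfold Spec_check_magic_square
  simp only [check_magic_square, check_magic_square_alt]
  have hcol0 : (((List.replicate ms.length (0:Int)).length : Int)) = ((ms.length : Int)) := by simp
  rw [pv_outer (ms.length : Int) es ms 0 (le_refl 0) _ hcol0 0 0 true]
  dsimp only
  rw [pv_all_pyRange ms (fun row => ((row.map pvCellA).sum == es)), Bool.true_and,
    zero_add, zero_add]
  by_cases hall : ms.all (fun row => (row.map pvCellA).sum == es)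
  · have hlen : ∀ row ∈ ms, ms.length ≤ row.length := by
      rcases hpre with h | ⟨row, hr, hne⟩
      · exact h
      · exfalso
        have hsum := List.all_eq_true.mp hall row hr
        rw [beq_iff_eq] at hsum
        apply hne
        rw [← hsum]
        congr 1
        exact (List.map_congr_left (fun c _ => (pvCellA_eq c))).symm
    have hD1 : ((PySem.List.pyRange 0 (ms.length : Int) 1).map
          (fun i => pvCellA (PySem.List.pyGetD (PySem.List.pyGetD ms i []) i 0))).sum
        = pvDiagSum1 (ms.length : Int) (PySem.List.enumerate ms 0) := by
      rw [pv_sum_pyRange_enum ms (fun i row => pvCellA (PySem.List.pyGetD row i 0))]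
      unfold pvDiagSum1
      refine congrArg List.sum ?_
      apply List.map_congr_left
      intro p hp
      obtain ⟨k, hk, rfl⟩ := (PySem.List.mem_enumerate_iff _ _ _).mp hp
      have hlk : ms.length ≤ ms[k].length := hlen _ (List.getElem_mem hk)
      dsimp only
      rw [if_pos ⟨by omega, by push_cast; omega, by push_cast; omega⟩]
    have hD2 : ((PySem.List.pyRange 0 (ms.length : Int) 1).map
          (fun i => pvCellA (PySem.List.pyGetD (PySem.List.pyGetD ms i []) ((ms.length : Int) - 1 - i) 0))).sum
        = pvDiagSum2 (ms.length : Int) (PySem.List.enumerate ms 0) := by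
      rw [pv_sum_pyRange_enum ms
        (fun i row => pvCellA (PySem.List.pyGetD row ((ms.length : Int) - 1 - i) 0))]
      unfold pvDiagSum2
      refine congrArg List.sum ?_
      apply List.map_congr_left
      intro p hp
      obtain ⟨k, hk, rfl⟩ := (PySem.List.mem_enumerate_iff _ _ _).mp hp
      have hlk : ms.length ≤ ms[k].length := hlen _ (List.getElem_mem hk)
      dsimp only
      rw [if_pos ⟨by push_cast; omega, by push_cast; omega⟩]
    have hC : ((PySem.List.pyRange 0 (ms.length : Int) 1).all
          (fun j => ((PySem.List.pyRange 0 (ms.length : Int) 1).map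
            (fun i => pvCellA (PySem.List.pyGetD (PySem.List.pyGetD ms i []) j 0))).sum == es))
        = ((pvColsAfter (List.replicate ms.length 0) ms).all (fun c => c == es)) := by
      apply Bool.coe_iff_coe.mp
      rw [List.all_eq_true, List.all_eq_true]
      have hcs : ∀ m : Nat, m < ms.length →
          pvColSum m ms = (ms.map (fun row => pvCellA (PySem.List.pyGetD row (m : Int) 0))).sum := by
        intro m hm
        unfold pvColSum
        refine congrArg List.sum ?_
        apply List.map_congr_left
        intro row hr
        rw [if_pos]
        have := hlen row hr
        push_cast
        omega
      constructor
      · intro h x hx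
        unfold pvColsAfter at hx
        obtain ⟨m, hmr, rfl⟩ := List.mem_map.mp hx
        rw [List.mem_range, List.length_replicate] at hmr
        have h' := h ((m : Int)) (PySem.List.mem_pyRange_one.mpr ⟨by omega, by omega⟩)
        rw [beq_iff_eq] at h' ⊢
        rw [pv_sum_pyRange ms (fun row => pvCellA (PySem.List.pyGetD row (m : Int) 0))] at h'
        rw [pv_getD_replicate, hcs m hmr, h']
        ring
      · intro h j hj
        rw [PySem.List.mem_pyRange_one] at hj
        obtain ⟨m, rfl⟩ : ∃ m : Nat, j = (m : Int) := ⟨j.toNat, by omega⟩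
        have hm : m < ms.length := by omega
        have hmem : (List.replicate ms.length (0:Int)).getD m 0 + pvColSum m ms
            ∈ pvColsAfter (List.replicate ms.length 0) ms := by
          unfold pvColsAfter
          exact List.mem_map_of_mem (by rw [List.mem_range, List.length_replicate]; exact hm)
        have h' := h _ hmem
        rw [beq_iff_eq] at h' ⊢
        rw [pv_getD_replicate] at h'
        rw [pv_sum_pyRange ms (fun row => pvCellA (PySem.List.pyGetD row (m : Int) 0)),
          ← hcs m hm]
        omega
    have hshape : ∀ a b c : Bool,
        (if a then (if b then (if c then true else false) else false) else false)
          = (((true && a) && b) && c) := by decide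
    rw [hall, hC, hD1, hD2, if_pos rfl]
    exact hshape _ _ _
  · rw [Bool.not_eq_true] at hall
    rw [hall]
    simp
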